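-- pv_equiv track=rewrite | github.com/JSchoreels/CrackingTheCodingInterview | Chapter_5_BitManipulation/ex_5_4_NextNumber.py | get_index_non_trailing_bit
-- ===== SOURCE A (Python) =====
-- def get_index_non_trailing_bit(bit_repr, bit_type = '0'):
--     non_trailing_zero = False
--     for i in range(0, len(bit_repr)):
--         if bit_repr[-1-i] == ('1' if bit_type == '0' else '0'):
--             non_trailing_zero = True
--         elif non_trailing_zero:
--             return i
--     return None
-- ===== SOURCE B (Python) =====
-- def get_index_non_trailing_bit(bit_repr, bit_type='0'):
--     opposite = '1' if bit_type == '0' else '0'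
--     # keep everything up to (and incl.) the last opposite bit, then strip that opposite run
--     kept = bit_repr[:bit_repr.rfind(opposite) + 1].rstrip(opposite)
--     return len(bit_repr) - len(kept) if kept else None
-- ===== Notes on version B (the rewrite author's own statement) =====
-- stated objective: alternative
-- what changed: Replaces A's flag-driven character-by-character backward scan with a loop-free closed form: slice the string up to the last opposite bit (str.rfind), strip that trailing opposite run (str.rstrip), and compute the answer as a length difference.
import Mathlib
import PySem

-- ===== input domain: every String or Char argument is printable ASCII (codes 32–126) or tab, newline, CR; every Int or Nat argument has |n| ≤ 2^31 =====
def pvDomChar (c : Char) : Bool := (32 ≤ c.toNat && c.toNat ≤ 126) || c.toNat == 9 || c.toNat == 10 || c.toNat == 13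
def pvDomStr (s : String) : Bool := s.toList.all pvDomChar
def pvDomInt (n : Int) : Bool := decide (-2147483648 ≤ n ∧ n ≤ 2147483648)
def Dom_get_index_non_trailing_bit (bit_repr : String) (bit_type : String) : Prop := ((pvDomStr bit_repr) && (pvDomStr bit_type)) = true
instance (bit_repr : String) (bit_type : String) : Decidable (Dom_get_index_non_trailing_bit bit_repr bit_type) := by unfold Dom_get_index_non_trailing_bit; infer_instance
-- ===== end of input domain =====

-- B replaces A's flag-driven backward scan by a loop-free closed form:
-- slice up to the last opposite bit (rfind), rstrip that opposite run, answer = length difference.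

-- ===== PORT A =====
-- for i in range(0, len(bit_repr)): flag-driven scan reading bit_repr[-1-i]
def pvA_loop (bit_repr : String) (opp : Char) (i : Nat) (flag : Bool) : Option Int :=
  if h : i < bit_repr.toList.length then
    if PySem.Str.pyGet? bit_repr (-1 - (i : Int)) = some opp then
      pvA_loop bit_repr opp (i + 1) true
    else if flag then some (i : Int)
    else pvA_loop bit_repr opp (i + 1) flag
  else none
termination_by bit_repr.toList.length - i
decreasing_by all_goals omega

def get_index_non_trailing_bit (bit_repr : String) (bit_type : String) : Option Int :=
  pvA_loop bit_repr (if bit_type = "0" then '1' else '0') 0 false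

-- ===== PORT B =====
-- exact hand port of str.rstrip(ch) for a SINGLE strip char: drop the maximal trailing run of ch
def pvRstripChar (l : List Char) (c : Char) : List Char :=
  (l.reverse.dropWhile (fun x => x = c)).reverse

def get_index_non_trailing_bit_alt (bit_repr : String) (bit_type : String) : Option Int :=
  let opp := if bit_type = "0" then '1' else '0'
  -- kept = bit_repr[:bit_repr.rfind(opposite) + 1].rstrip(opposite)
  let kept := pvRstripChar
    (PySem.List.slice bit_repr.toList none (some (PySem.Chars.rfind bit_repr.toList [opp] + 1))) opp
  -- len(bit_repr) - len(kept) if kept else None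
  if kept = [] then none else some ((bit_repr.toList.length : Int) - (kept.length : Int))

-- ===== PRECONDITION & SPEC =====
def Spec_get_index_non_trailing_bit (bit_repr : String) (bit_type : String) (out : Option Int) : Prop := out = get_index_non_trailing_bit_alt bit_repr bit_type
instance (bit_repr : String) (bit_type : String) (out : Option Int) : Decidable (Spec_get_index_non_trailing_bit bit_repr bit_type out) := by unfold Spec_get_index_non_trailing_bit; infer_instance

-- ===== CLAIM (what is proved, stated in full; the proofs are below) =====
def Claim_equal_get_index_non_trailing_bit : Prop := ∀ (bit_repr : String) (bit_type : String), Dom_get_index_non_trailing_bit bit_repr bit_type → Spec_get_index_non_trailing_bit bit_repr bit_type (get_index_non_trailing_bit bit_repr bit_type)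

-- ===== LEMMAS AND PROOFS =====

-- proof-side helper: first index k ≥ i with rev[k] ≠ opp (phase 2 of A's scan)
def pvB_scan (rev : List Char) (opp : Char) (k : Nat) : Option Int :=
  if h : k < rev.length then
    if rev[k] ≠ opp then some (k : Int) else pvB_scan rev opp (k + 1)
  else none
termination_by rev.length - k

-- proof-side helper: first index j ≥ i with rev[j] = opp
def firstOpp (rev : List Char) (opp : Char) (i : Nat) : Option Nat :=
  if h : i < rev.length then
    if rev[i] = opp then some i else firstOpp rev opp (i + 1)
  else none
termination_by rev.length - i

theorem pyGet_rev (s : String) (i : Nat) (h : i < s.toList.length) :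
    PySem.Str.pyGet? s (-1 - (i : Int)) = s.toList.reverse[i]? := by
  have h1 : (-1 - (i : Int)) = -(((i + 1 : Nat)) : Int) := by push_cast; ring
  rw [PySem.Str.pyGet?_eq, h1]
  show PySem.List.pyGet? s.toList _ = _
  rw [PySem.List.pyGet?_neg_natCast s.toList (i + 1) (by omega) (by omega), List.getElem?_reverse h]
  congr 1
  omega

theorem phase2 (s : String) (opp : Char) :
    ∀ i, pvA_loop s opp i true = pvB_scan s.toList.reverse opp i := by
  intro i
  induction' hn : s.toList.length - i using Nat.strong_induction_on with n ih generalizing i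
  rw [pvA_loop.eq_def, pvB_scan.eq_def]
  by_cases h : i < s.toList.length
  · have hlt : i < s.toList.reverse.length := by simpa using h
    rw [dif_pos h, dif_pos hlt, pyGet_rev s i h, List.getElem?_eq_getElem hlt]
    by_cases hc : s.toList.reverse[i] = opp
    · rw [if_pos (by rw [hc]), if_neg (by simp [hc])]
      exact ih (s.toList.length - (i + 1)) (by omega) (i + 1) rfl
    · rw [if_neg (by simpa using hc), if_pos hc, if_pos rfl]
  · rw [dif_neg h, dif_neg (by simpa using h)]

theorem phase1 (s : String) (opp : Char) :
    ∀ i, pvA_loop s opp i false =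
      match firstOpp s.toList.reverse opp i with
      | none => none
      | some j => pvB_scan s.toList.reverse opp (j + 1) := by
  intro i
  induction' hn : s.toList.length - i using Nat.strong_induction_on with n ih generalizing i
  rw [pvA_loop.eq_def]
  by_cases h : i < s.toList.length
  · have hlt : i < s.toList.reverse.length := by simpa using h
    rw [dif_pos h, pyGet_rev s i h, List.getElem?_eq_getElem hlt]
    by_cases hc : s.toList.reverse[i] = opp
    · rw [if_pos (by rw [hc])]
      have hf : firstOpp s.toList.reverse opp i = some i := by
        rw [firstOpp.eq_def, dif_pos hlt, if_pos hc]
      rw [hf]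
      exact phase2 s opp (i + 1)
    · rw [if_neg (by simpa using hc), if_neg (by simp)]
      have hf : firstOpp s.toList.reverse opp i = firstOpp s.toList.reverse opp (i + 1) := by
        rw [firstOpp.eq_def, dif_pos hlt, if_neg hc]
      rw [hf]
      exact ih (s.toList.length - (i + 1)) (by omega) (i + 1) rfl
  · rw [dif_neg h]
    have hf : firstOpp s.toList.reverse opp i = none := by
      rw [firstOpp.eq_def, dif_neg (by simpa using h)]
    rw [hf]

theorem firstOpp_some (rev : List Char) (opp : Char) :
    ∀ i k, firstOpp rev opp i = some k →
      rev[k]? = some opp ∧ i ≤ k ∧ ∀ m, i ≤ m → m < k → rev[m]? ≠ some opp := by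
  intro i
  induction' hn : rev.length - i using Nat.strong_induction_on with n ih generalizing i
  intro k hk
  rw [firstOpp.eq_def] at hk
  by_cases h : i < rev.length
  · rw [dif_pos h] at hk
    by_cases hc : rev[i] = opp
    · rw [if_pos hc] at hk
      cases hk
      exact ⟨by rw [List.getElem?_eq_getElem h, hc], le_refl _,
        fun m h1 h2 => absurd h1 (by omega)⟩
    · rw [if_neg hc] at hk
      obtain ⟨h1, h2, h3⟩ := ih (rev.length - (i + 1)) (by omega) (i + 1) rfl k hk
      refine ⟨h1, by omega, fun m hm1 hm2 => ?_⟩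
      rcases Nat.eq_or_lt_of_le hm1 with rfl | hlt'
      · rw [List.getElem?_eq_getElem h]
        simpa using hc
      · exact h3 m hlt' hm2
  · rw [dif_neg h] at hk
    cases hk

theorem firstOpp_none (rev : List Char) (opp : Char) :
    ∀ i, firstOpp rev opp i = none → ∀ m, i ≤ m → rev[m]? ≠ some opp := by
  intro i
  induction' hn : rev.length - i using Nat.strong_induction_on with n ih generalizing i
  intro hk m him hcon
  rw [firstOpp.eq_def] at hk
  by_cases h : i < rev.length
  · rw [dif_pos h] at hk
    by_cases hc : rev[i] = opp
    · rw [if_pos hc] at hk; cases hk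
    · rw [if_neg hc] at hk
      rcases Nat.eq_or_lt_of_le him with rfl | hlt'
      · rw [List.getElem?_eq_getElem h] at hcon
        exact hc (by injection hcon)
      · exact ih (rev.length - (i + 1)) (by omega) (i + 1) rfl hk m hlt' hcon
  · have : m < rev.length := by
      by_contra hcon2
      rw [List.getElem?_eq_none (by omega)] at hcon
      cases hcon
    omega

theorem isPrefixOf_drop_singleton (s : List Char) (c : Char) (i : Nat) :
    [c].isPrefixOf (s.drop i) = true ↔ s[i]? = some c := by
  rw [List.isPrefixOf_iff_prefix]
  constructor
  · rintro ⟨u, hu⟩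
    have hh : (s.drop i).head? = some c := by rw [← hu]; simp
    rwa [List.head?_drop] at hh
  · intro h
    have hlt : i < s.length := by
      by_contra hcon
      rw [List.getElem?_eq_none (by omega)] at h
      cases h
    have hc : s[i] = c := by
      rw [List.getElem?_eq_getElem hlt] at h
      injection h
    exact ⟨s.drop (i + 1), by rw [List.drop_eq_getElem_cons hlt, hc]; rfl⟩

-- rfind.go finds the HIGHEST index ≤ x where [c] matches
theorem rfind_go_eq_neg_one (s : List Char) (c : Char) :
    ∀ x, (∀ i, i ≤ x → s[i]? ≠ some c) → PySem.Chars.rfind.go s [c] x = -1 := by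
  intro x
  induction x with
  | zero =>
    intro h
    rw [PySem.Chars.rfind.go]
    rw [if_neg]
    intro hcon
    exact h 0 (le_refl 0) ((isPrefixOf_drop_singleton s c 0).mp (by simpa using hcon))
  | succ j ih =>
    intro h
    rw [PySem.Chars.rfind.go]
    rw [if_neg]
    · exact ih (fun i hi => h i (by omega))
    · intro hcon
      exact h (j + 1) (le_refl _) ((isPrefixOf_drop_singleton s c (j + 1)).mp hcon)

theorem rfind_go_eq_of_max (s : List Char) (c : Char) (p : Nat)
    (hp : s[p]? = some c) (hmax : ∀ m, p < m → s[m]? ≠ some c) :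
    ∀ x, p ≤ x → PySem.Chars.rfind.go s [c] x = (p : Int) := by
  intro x
  induction x with
  | zero =>
    intro h
    have hp0 : p = 0 := by omega
    subst hp0
    have hp' : [c].isPrefixOf s = true := by
      simpa using (isPrefixOf_drop_singleton s c 0).mpr hp
    rw [PySem.Chars.rfind.go, if_pos hp']
    simp
  | succ j ih =>
    intro h
    rw [PySem.Chars.rfind.go]
    rcases Nat.eq_or_lt_of_le h with rfl | hlt
    · rw [if_pos ((isPrefixOf_drop_singleton s c (j + 1)).mpr hp)]
    · rw [if_neg]
      · exact ih (by omega)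
      · intro hcon
        exact hmax (j + 1) (by omega) ((isPrefixOf_drop_singleton s c (j + 1)).mp hcon)

-- pvB_scan as a dropWhile closed form
theorem scan_dropWhile (rev : List Char) (opp : Char) :
    ∀ i, i ≤ rev.length →
      pvB_scan rev opp i =
        (if (rev.drop i).dropWhile (fun x => x = opp) = [] then none
         else some ((rev.length : Int) - (((rev.drop i).dropWhile (fun x => x = opp)).length : Int))) := by
  intro i
  induction' hn : rev.length - i using Nat.strong_induction_on with n ih generalizing i
  intro hi
  rw [pvB_scan.eq_def]
  by_cases h : i < rev.length
  · rw [dif_pos h, List.drop_eq_getElem_cons h, List.dropWhile_cons]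
    by_cases hc : rev[i] = opp
    · rw [if_neg (show ¬(rev[i] ≠ opp) from by simp [hc]),
          if_pos (show decide (rev[i] = opp) = true from by simp [hc])]
      exact ih (rev.length - (i + 1)) (by omega) (i + 1) rfl (by omega)
    · rw [if_pos (show rev[i]'h ≠ opp from hc),
          if_neg (show ¬(decide (rev[i]'h = opp) = true) from by simp [hc]),
          if_neg (List.cons_ne_nil _ _)]
      simp only [Option.some.injEq, List.length_cons, List.length_drop]
      push_cast
      omega
  · have hi' : i = rev.length := by omega
    rw [dif_neg h, hi', List.drop_length]
    simp

theorem reverse_take_eq (s : List Char) (m : Nat) (_h : m ≤ s.length) :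
    (s.take m).reverse = s.reverse.drop (s.length - m) := by
  rw [List.reverse_take]

-- ===== VERDICT (by name: the statement is the Claim_ definition above) =====
theorem get_index_non_trailing_bit_spec : Claim_equal_get_index_non_trailing_bit := by
  intro bit_repr bit_type _hdom
  unfold Spec_get_index_non_trailing_bit get_index_non_trailing_bit get_index_non_trailing_bit_alt
  generalize (if bit_type = "0" then '1' else '0') = opp
  cases hfo : firstOpp bit_repr.toList.reverse opp 0 with
  | none =>
    have hA : pvA_loop bit_repr opp 0 false = none := by
      rw [phase1, hfo]
    rw [hA]
    have hnone' : ∀ i, i ≤ bit_repr.toList.length → bit_repr.toList[i]? ≠ some opp := by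
      intro i hi hcon
      have hlt : i < bit_repr.toList.length := by
        by_contra hcon2
        rw [List.getElem?_eq_none (by omega)] at hcon
        cases hcon
      have hr : bit_repr.toList.reverse[bit_repr.toList.length - 1 - i]? = bit_repr.toList[i]? := by
        rw [List.getElem?_reverse (by omega : bit_repr.toList.length - 1 - i < bit_repr.toList.length)]
        congr 1
        omega
      exact firstOpp_none _ opp 0 hfo _ (Nat.zero_le _) (by rw [hr]; exact hcon)
    have hrf : PySem.Chars.rfind bit_repr.toList [opp] = -1 := by
      rw [PySem.Chars.rfind]
      exact rfind_go_eq_neg_one _ opp _ hnone'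
    have h01 : (-1 : Int) + 1 = ((0 : Nat) : Int) := by norm_num
    simp only [hrf, h01, PySem.List.slice_to_natCast]
    simp [pvRstripChar]
  | some j =>
    have hA : pvA_loop bit_repr opp 0 false = pvB_scan bit_repr.toList.reverse opp (j + 1) := by
      rw [phase1, hfo]
    rw [hA]
    obtain ⟨hj, -, hjmin⟩ := firstOpp_some _ opp 0 j hfo
    have hjn : j < bit_repr.toList.length := by
      by_contra hcon
      rw [List.getElem?_eq_none (by simp only [List.length_reverse]; omega)] at hj
      cases hj
    have hsp := hj
    rw [List.getElem?_reverse hjn] at hsp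
    have hsmax : ∀ m, bit_repr.toList.length - 1 - j < m → bit_repr.toList[m]? ≠ some opp := by
      intro m hm hcon
      have hmlt : m < bit_repr.toList.length := by
        by_contra hcon2
        rw [List.getElem?_eq_none (by omega)] at hcon
        cases hcon
      have hr : bit_repr.toList.reverse[bit_repr.toList.length - 1 - m]? = bit_repr.toList[m]? := by
        rw [List.getElem?_reverse (by omega : bit_repr.toList.length - 1 - m < bit_repr.toList.length)]
        congr 1
        omega
      have harg : bit_repr.toList.length - 1 - m < j := by omega
      exact hjmin _ (Nat.zero_le _) harg (by rw [hr]; exact hcon)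
    have hrf : PySem.Chars.rfind bit_repr.toList [opp]
        = ((bit_repr.toList.length - 1 - j : Nat) : Int) := by
      rw [PySem.Chars.rfind]
      exact rfind_go_eq_of_max _ opp _ hsp hsmax _ (by omega)
    have hcast : ((bit_repr.toList.length - 1 - j : Nat) : Int) + 1
        = ((bit_repr.toList.length - j : Nat) : Int) := by omega
    have htake : (bit_repr.toList.take (bit_repr.toList.length - j)).reverse
        = bit_repr.toList.reverse.drop j := by
      rw [reverse_take_eq _ _ (by omega)]
      congr 1
      omega
    have hrevj : bit_repr.toList.reverse.drop j
        = opp :: bit_repr.toList.reverse.drop (j + 1) := by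
      have hjr : j < bit_repr.toList.reverse.length := by simpa using hjn
      rw [List.drop_eq_getElem_cons hjr]
      have hje : bit_repr.toList.reverse[j] = opp := by
        rw [List.getElem?_eq_getElem hjr] at hj
        injection hj
      rw [hje]
    have hkept : pvRstripChar (bit_repr.toList.take (bit_repr.toList.length - j)) opp
        = ((bit_repr.toList.reverse.drop (j + 1)).dropWhile (fun x => x = opp)).reverse := by
      simp only [pvRstripChar]
      rw [htake, hrevj, List.dropWhile_cons, if_pos (by simp)]
    simp only [hrf, hcast, PySem.List.slice_to_natCast, hkept]
    rw [scan_dropWhile _ opp (j + 1) (by simpa using hjn)]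
    by_cases hdw : ((bit_repr.toList.reverse.drop (j + 1)).dropWhile (fun x => x = opp)) = []
    · simp [hdw]
    · rw [if_neg hdw, if_neg (by simpa using hdw)]
      simp
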